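-- pv_equiv track=rewrite | github.com/yujinii59/AlgorithmPractice | 프로그래머스/unrated/140108. 문자열 나누기/문자열 나누기.py | solution
-- ===== SOURCE A (Python) =====
-- def solution(s):
--     answer = 0
--     first = ''
--     cnts = [0,0]
--     for string in s:
--         if first == '':
--             answer += 1
--             first = string
--             cnts[0] += 1
--         elif string == first:
--             cnts[0] += 1
--         else:
--             cnts[1] += 1
--
--         if cnts[0] == cnts[1]:
--             first = ''
--             cnts = [0,0]
--     return answer
-- ===== SOURCE B (Python) =====
-- def solution(s):
--     if s == '':
--         return 0
--     first = s[0]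
--     bal = 0
--     for i, c in enumerate(s):
--         bal += 1 if c == first else -1
--         if bal == 0:
--             return 1 + solution(s[i+1:])
--     return 1
-- ===== Notes on version B (the rewrite author's own statement) =====
-- stated objective: alternative
-- what changed: Recursive divide-and-conquer: a scan finds the end of the first balanced segment, the string is sliced there and solution recurses on the remainder, counting 1 per segment, instead of A's single fold over a two-counter state with an in-place reset.
import Mathlib
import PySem

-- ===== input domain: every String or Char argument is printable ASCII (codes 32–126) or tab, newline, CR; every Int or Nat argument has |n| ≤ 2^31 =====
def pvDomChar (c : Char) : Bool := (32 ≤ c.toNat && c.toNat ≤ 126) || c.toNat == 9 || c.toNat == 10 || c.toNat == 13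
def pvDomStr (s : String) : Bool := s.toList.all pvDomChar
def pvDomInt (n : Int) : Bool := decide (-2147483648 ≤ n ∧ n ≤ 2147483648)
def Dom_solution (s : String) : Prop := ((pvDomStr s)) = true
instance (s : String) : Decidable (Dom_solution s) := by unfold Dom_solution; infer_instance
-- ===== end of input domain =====

-- B replaces A's single fold over a two-counter state with in-place resets by a recursive
-- decomposition: a scan finds the end of the first balanced segment, then recurse on the rest.

-- ===== PORT A =====
-- state: (answer, first as List Char with [] = '', cnts[0], cnts[1])
def solStepA (st : Int × List Char × Int × Int) (c : Char) : Int × List Char × Int × Int :=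
  let (ans, first, c0, c1) := st
  let (ans, first, c0, c1) :=
    if first = ([] : List Char) then (ans + 1, [c], c0 + 1, c1)
    else if [c] = first then (ans, first, c0 + 1, c1)
    else (ans, first, c0, c1 + 1)
  if c0 = c1 then (ans, ([] : List Char), (0 : Int), (0 : Int)) else (ans, first, c0, c1)

def solution (s : String) : Int :=
  (s.toList.foldl solStepA (0, ([] : List Char), 0, 0)).1

-- ===== PORT B =====
-- the loop of Source B: scan with a running balance; on balance 0 return the remainder (the slice s[i+1:]),
-- none = the loop falls through without the balance reaching 0
def findRest (first : Char) : Int → List Char → Option (List Char)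
  | _, [] => none
  | bal, c :: t =>
      if bal + (if c = first then 1 else -1) = 0 then some t
      else findRest first (bal + (if c = first then 1 else -1)) t

-- termination lemma for solAltList (the port cites it in decreasing_by)
theorem findRest_length {first : Char} : ∀ {bal : Int} {l r : List Char},
    findRest first bal l = some r → r.length < l.length := by
  intro bal l
  induction l generalizing bal with
  | nil => intro r h; simp [findRest] at h
  | cons c t ih =>
    intro r h
    rw [findRest] at h
    by_cases hc : c = first
    · simp only [if_pos hc] at h
      split at h
      · cases h; simp
      · exact Nat.lt_trans (ih h) (by simp)
    · simp only [if_neg hc] at h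
      split at h
      · cases h; simp
      · exact Nat.lt_trans (ih h) (by simp)

-- Source B: empty string → 0; otherwise 1 for the first segment plus the recursion on the remainder
def solAltList : List Char → Int
  | [] => 0
  | c :: t =>
    match h : findRest c 0 (c :: t) with
    | none => 1
    | some r => 1 + solAltList r
termination_by l => l.length
decreasing_by exact findRest_length h

def solution_alt (s : String) : Int := solAltList s.toList

-- ===== PRECONDITION & SPEC =====
def Spec_solution (s : String) (out : Int) : Prop := out = solution_alt s
instance (s : String) (out : Int) : Decidable (Spec_solution s out) := by unfold Spec_solution; infer_instance

-- ===== CLAIM (what is proved, stated in full; the proofs are below) =====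
def Claim_equal_solution : Prop := ∀ (s : String), Dom_solution s → Spec_solution s (solution s)

-- ===== LEMMAS AND PROOFS =====

theorem solAltList_cons (c : Char) (t : List Char) :
    solAltList (c :: t) = (match findRest c 1 t with
      | none => 1
      | some r => 1 + solAltList r) := by
  rw [solAltList]
  have h0 : findRest c 0 (c :: t) = findRest c 1 t := by
    rw [findRest, if_pos rfl, if_neg (by omega : ¬ ((0:Int) + 1 = 0))]
    norm_num
  split
  next h => rw [h0] at h; rw [h]
  next r h => rw [h0] at h; rw [h]

-- Combined invariant, by strong induction on the list length:
-- P l: A's fold from the empty-segment state adds solAltList l to the answer;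
-- Q l: mid-segment (c1 < c0, first stored), A's fold follows findRest on the remainder.
theorem sol_main : ∀ (n : Nat) (l : List Char), l.length ≤ n →
    (∀ a : Int, (l.foldl solStepA (a, ([] : List Char), 0, 0)).1 = a + solAltList l) ∧
    (∀ (a : Int) (first : Char) (c0 c1 : Int), c1 < c0 →
      (l.foldl solStepA (a, [first], c0, c1)).1 =
        match findRest first (c0 - c1) l with
        | none => a
        | some r => a + solAltList r) := by
  intro n
  induction n with
  | zero =>
    intro l hl
    have : l = [] := List.eq_nil_of_length_eq_zero (Nat.le_zero.mp hl)
    subst this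
    exact ⟨fun a => by simp [solAltList], fun a first c0 c1 _ => by simp [findRest]⟩
  | succ n ih =>
    intro l hl
    match l with
    | [] => exact ⟨fun a => by simp [solAltList], fun a first c0 c1 _ => by simp [findRest]⟩
    | c :: t =>
      have ht : t.length ≤ n := by simpa using Nat.lt_succ_iff.mp (Nat.lt_of_lt_of_le (by simp) hl)
      have ihQ := (ih t ht).2
      have ihP := (ih t ht).1
      constructor
      · -- P (c :: t)
        intro a
        have step : (List.foldl solStepA (a, ([] : List Char), 0, 0) (c :: t)).1
            = (List.foldl solStepA (a + 1, [c], 1, 0) t).1 := by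
          simp [solStepA]
        rw [step, ihQ (a + 1) c 1 0 (by norm_num), solAltList_cons]
        norm_num
        cases hr : findRest c 1 t with
        | none => simp
        | some r => simp; ring
      · -- Q (c :: t)
        intro a first c0 c1 hlt
        by_cases hc : c = first
        · subst hc
          have step : (List.foldl solStepA (a, [c], c0, c1) (c :: t)).1
              = (List.foldl solStepA (a, [c], c0 + 1, c1) t).1 := by
            simp [solStepA, show ¬ c0 + 1 = c1 by omega]
          have hfr : findRest c (c0 - c1) (c :: t) = findRest c (c0 + 1 - c1) t := by
            rw [findRest, if_pos rfl, if_neg (by omega : ¬ (c0 - c1 + 1 = 0)),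
              show c0 - c1 + 1 = c0 + 1 - c1 by ring]
          rw [step, ihQ a c (c0 + 1) c1 (by omega), hfr]
        · by_cases he : c0 = c1 + 1
          · have step : (List.foldl solStepA (a, [first], c0, c1) (c :: t)).1
                = (List.foldl solStepA (a, ([] : List Char), 0, 0) t).1 := by
              simp [solStepA, he, show ([c] : List Char) ≠ [first] by simpa using hc]
            have hfr : findRest first (c0 - c1) (c :: t) = some t := by
              rw [findRest, if_neg hc, if_pos (by omega : c0 - c1 + -1 = 0)]
            rw [step, ihP a, hfr]
          · have step : (List.foldl solStepA (a, [first], c0, c1) (c :: t)).1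
                = (List.foldl solStepA (a, [first], c0, c1 + 1) t).1 := by
              simp [solStepA, he, show ([c] : List Char) ≠ [first] by simpa using hc]
            have hfr : findRest first (c0 - c1) (c :: t) = findRest first (c0 - (c1 + 1)) t := by
              rw [findRest, if_neg hc, if_neg (by omega : ¬ (c0 - c1 + -1 = 0)),
                show c0 - c1 + -1 = c0 - (c1 + 1) by ring]
            rw [step, ihQ a first c0 (c1 + 1) (by omega), hfr]

-- ===== VERDICT (by name: the statement is the Claim_ definition above) =====
theorem solution_spec : Claim_equal_solution := by
  intro s _
  unfold Spec_solution solution solution_alt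
  exact ((sol_main s.toList.length s.toList le_rfl).1 0).trans (by ring)
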